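-- pv_equiv track=rewrite | github.com/familyfunchallenger/learn-as-we-go | SlidingWindow/MinimumWindowString.py | _windowHasAll
-- ===== SOURCE A (Python) =====
-- def _windowHasAll(w: str, t: str) -> bool:
--     ret = True
--     # w is the window, t is the target
--     if len(w) < len(t):
--         return False
--     copyW = w
--     for c in t:
--         if c in copyW:
--             # remove c from w and then continue the loop
--             copyW = copyW.replace(c, '', 1)
--         else:
--             return False
--     return ret
-- ===== SOURCE B (Python) =====
-- def _windowHasAll(w: str, t: str) -> bool:
--     # Sort both strings, then one linear merge pass: for each target char,
--     # advance through the sorted window until it is found (consume it) or run out.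
--     sw = sorted(w)
--     st = sorted(t)
--     i = 0
--     n = len(sw)
--     for c in st:
--         while i < n and sw[i] != c:
--             i += 1
--         if i == n:
--             return False
--         i += 1
--     return True
-- ===== Notes on version B (the rewrite author's own statement) =====
-- stated objective: faster
-- what changed: Sorts both strings once and checks multiset containment with a single two-pointer merge pass, instead of A's loop that rescans and destructively rebuilds the window string (substring test + replace) for every target character.
import Mathlib
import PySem

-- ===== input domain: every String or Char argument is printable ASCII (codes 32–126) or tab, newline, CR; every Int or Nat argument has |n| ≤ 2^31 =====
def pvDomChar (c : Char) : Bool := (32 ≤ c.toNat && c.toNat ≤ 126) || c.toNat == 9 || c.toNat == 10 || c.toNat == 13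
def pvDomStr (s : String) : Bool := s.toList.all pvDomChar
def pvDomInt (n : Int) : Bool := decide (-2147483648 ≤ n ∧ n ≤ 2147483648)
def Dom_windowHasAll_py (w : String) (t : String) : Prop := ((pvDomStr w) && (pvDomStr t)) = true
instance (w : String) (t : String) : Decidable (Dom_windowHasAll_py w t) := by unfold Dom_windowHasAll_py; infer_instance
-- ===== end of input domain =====

-- B replaces A's repeated substring-scan + destructive replace with a sort of both
-- strings followed by a single two-pointer merge pass (objective: faster, O(n log n) sort+merge vs A's quadratic rescans).


-- ===== PORT A =====
-- exact: 'copyW.replace(c, "", 1)' for a single character c removes the first occurrence of c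
def pvEraseFirst : List Char → Char → List Char
  | [], _ => []
  | x :: xs, c => if x = c then xs else x :: pvEraseFirst xs c

-- the 'for c in t' loop with state copyW; 'c in copyW' for a single char is element membership
def pvLoopA : List Char → List Char → Bool
  | [], _ => true
  | c :: ts, copyW => if copyW.contains c then pvLoopA ts (pvEraseFirst copyW c) else false

def windowHasAll_py (w : String) (t : String) : Bool :=
  if w.toList.length < t.toList.length then false
  else pvLoopA t.toList w.toList

-- ===== PORT B =====
-- the 'for c in st' loop; the inner while advances through sw (dropping heads) until it hits c
def pvMerge : List Char → List Char → Bool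
  | _, [] => true
  | [], _ :: _ => false
  | x :: sw, c :: st => if x = c then pvMerge sw st else pvMerge sw (c :: st)

def windowHasAll_py_alt (w : String) (t : String) : Bool :=
  pvMerge (PySem.List.sorted w.toList (fun x => x) false)
          (PySem.List.sorted t.toList (fun x => x) false)

-- ===== PRECONDITION & SPEC =====
def Spec_windowHasAll_py (w : String) (t : String) (out : Bool) : Prop := out = windowHasAll_py_alt w t
instance (w : String) (t : String) (out : Bool) : Decidable (Spec_windowHasAll_py w t out) := by unfold Spec_windowHasAll_py; infer_instance

-- ===== CLAIM (what is proved, stated in full; the proofs are below) =====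
def Claim_equal_windowHasAll_py : Prop := ∀ (w : String) (t : String), Dom_windowHasAll_py w t → Spec_windowHasAll_py w t (windowHasAll_py w t)

-- ===== LEMMAS AND PROOFS =====

-- the common characterisation: every char of ts is covered (with multiplicity) by cw
theorem pvEraseFirst_eq (cw : List Char) (c : Char) : pvEraseFirst cw c = cw.erase c := by
  induction cw with
  | nil => rfl
  | cons x xs ih =>
    by_cases hx : x = c
    · simp [pvEraseFirst, hx]
    · rw [pvEraseFirst, if_neg hx, List.erase_cons, if_neg (by simpa using hx), ih]

theorem pvLoopA_iff (ts : List Char) (cw : List Char) :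
    pvLoopA ts cw = true ↔ ∀ c, ts.count c ≤ cw.count c := by
  induction ts generalizing cw with
  | nil => simp [pvLoopA]
  | cons c ts ih =>
    by_cases h : c ∈ cw
    · rw [pvLoopA, if_pos (by simpa using h), pvEraseFirst_eq, ih]
      have hc : 1 ≤ cw.count c := List.one_le_count_iff.mpr h
      constructor
      · intro H d
        have h1 := H d
        rw [List.count_erase] at h1
        rw [List.count_cons]
        by_cases hd : c = d
        · subst hd; simp at h1 ⊢; omega
        · simp [hd] at h1 ⊢; omega
      · intro H d
        have h1 := H d
        rw [List.count_cons] at h1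
        rw [List.count_erase]
        by_cases hd : c = d
        · subst hd; simp at h1 ⊢; omega
        · simp [hd] at h1 ⊢; omega
    · rw [pvLoopA, if_neg (by simpa using h)]
      have hc : cw.count c = 0 := List.count_eq_zero.mpr h
      refine iff_of_false (by simp) ?_
      intro H
      have h1 := H c
      rw [List.count_cons, hc] at h1
      simp at h1
  -- end of pvLoopA_iff

theorem pvMerge_iff (sw : List Char) : ∀ st : List Char,
    sw.Pairwise (· ≤ ·) → st.Pairwise (· ≤ ·) →
    (pvMerge sw st = true ↔ ∀ c, st.count c ≤ sw.count c) := by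
  induction sw with
  | nil =>
    intro st _ _
    cases st with
    | nil => simp [pvMerge]
    | cons c st =>
      refine iff_of_false (by simp [pvMerge]) ?_
      intro H
      have h1 := H c
      simp at h1
  | cons x sw ih =>
    intro st hsw hst
    cases st with
    | nil => simp [pvMerge]
    | cons c st =>
      have hsw' := List.pairwise_cons.mp hsw
      have hst' := List.pairwise_cons.mp hst
      by_cases hxc : x = c
      · subst hxc
        rw [pvMerge, if_pos rfl, ih st hsw'.2 hst'.2]
        constructor
        · intro H d
          have h1 := H d
          rw [List.count_cons, List.count_cons]
          omega
        · intro H d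
          have h1 := H d
          rw [List.count_cons, List.count_cons] at h1
          omega
      · rw [pvMerge, if_neg hxc, ih (c :: st) hsw'.2 hst]
        constructor
        · intro H d
          have h1 := H d
          have h2 : sw.count d ≤ (x :: sw).count d := by
            rw [List.count_cons]; omega
          exact le_trans h1 h2
        · intro H d
          rcases lt_or_gt_of_ne hxc with hlt | hgt
          · -- x < c : x occurs nowhere in c :: st, the window head x is skippable
            have hnot : x ∉ c :: st := by
              intro hmem
              rcases List.mem_cons.mp hmem with h1 | h1
              · exact hxc h1
              · exact absurd (hst'.1 x h1) (not_le.mpr hlt)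
            by_cases hd : d = x
            · rw [hd, List.count_eq_zero.mpr hnot]
              exact Nat.zero_le _
            · have hxd : ¬ x = d := fun h => hd h.symm
              have h2 : (x :: sw).count d = sw.count d := by
                rw [List.count_cons, if_neg (by simpa using hxd)]; omega
              have h1 := H d
              rw [h2] at h1
              exact h1
          · -- c < x : c cannot occur in x :: sw, contradiction
            exfalso
            have hcnot : c ∉ x :: sw := by
              intro hmem
              rcases List.mem_cons.mp hmem with h1 | h1
              · exact hxc h1.symm
              · exact absurd (hsw'.1 c h1) (not_le.mpr hgt)
            have h1 := H c
            rw [List.count_cons, List.count_eq_zero.mpr hcnot] at h1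
            simp at h1

theorem cov_length {ts cw : List Char} (H : ∀ c, ts.count c ≤ cw.count c) :
    ts.length ≤ cw.length :=
  (List.subperm_ext_iff.mpr (fun x _ => H x)).length_le

theorem windowHasAll_py_eq_cov (w t : String) :
    windowHasAll_py w t = true ↔ ∀ c, t.toList.count c ≤ w.toList.count c := by
  unfold windowHasAll_py
  split
  · rename_i hlen
    refine iff_of_false (by simp) ?_
    intro H
    exact absurd (cov_length H) (not_le.mpr hlen)
  · exact pvLoopA_iff _ _

theorem windowHasAll_py_alt_eq_cov (w t : String) :
    windowHasAll_py_alt w t = true ↔ ∀ c, t.toList.count c ≤ w.toList.count c := by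
  unfold windowHasAll_py_alt
  rw [pvMerge_iff _ _ (PySem.List.sorted_pairwise _ _) (PySem.List.sorted_pairwise _ _)]
  constructor <;> intro H c <;> have h1 := H c <;>
    simpa [((PySem.List.sorted_perm w.toList (fun x => x) false)).count_eq,
           ((PySem.List.sorted_perm t.toList (fun x => x) false)).count_eq] using h1

-- ===== VERDICT (by name: the statement is the Claim_ definition above) =====
theorem windowHasAll_py_spec : Claim_equal_windowHasAll_py := by
  intro w t _
  unfold Spec_windowHasAll_py
  rw [Bool.eq_iff_iff, windowHasAll_py_eq_cov, windowHasAll_py_alt_eq_cov]
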